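-- pv_equiv track=rewrite | github.com/Mr-Righteousdev/smartscan | auth.py | decrypt_data
-- ===== SOURCE A (Python) =====
-- def decrypt_data(encrypted_data):
--     """Decrypt data (educational simulation)"""
--     if not encrypted_data.startswith("ENCRYPTED:"):
--         return encrypted_data
--
--     data = encrypted_data[10:]  # Remove "ENCRYPTED:" prefix
--     key = -13  # Reverse ROT13
--     decrypted = ""
--
--     for char in data:
--         if char.isalpha():
--             ascii_offset = ord('a') if char.islower() else ord('A')
--             decrypted += chr((ord(char) - ascii_offset + key) % 26 + ascii_offset)
--         else:
--             decrypted += char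
--
--     return decrypted
-- ===== SOURCE B (Python) =====
-- _ROT13 = str.maketrans(
--     "abcdefghijklmnopqrstuvwxyzABCDEFGHIJKLMNOPQRSTUVWXYZ",
--     "nopqrstuvwxyzabcdefghijklmNOPQRSTUVWXYZABCDEFGHIJKLM",
-- )
--
--
-- def decrypt_data(encrypted_data):
--     """Decrypt data (educational simulation)"""
--     if not encrypted_data.startswith("ENCRYPTED:"):
--         return encrypted_data
--     return encrypted_data[10:].translate(_ROT13)
-- ===== Notes on version B (the rewrite author's own statement) =====
-- stated objective: idiomatic
-- what changed: Replaces the per-character isalpha/ord arithmetic loop with a translation table built once via str.maketrans (ROT13 is self-inverse) applied in a single str.translate call.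
import Mathlib
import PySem

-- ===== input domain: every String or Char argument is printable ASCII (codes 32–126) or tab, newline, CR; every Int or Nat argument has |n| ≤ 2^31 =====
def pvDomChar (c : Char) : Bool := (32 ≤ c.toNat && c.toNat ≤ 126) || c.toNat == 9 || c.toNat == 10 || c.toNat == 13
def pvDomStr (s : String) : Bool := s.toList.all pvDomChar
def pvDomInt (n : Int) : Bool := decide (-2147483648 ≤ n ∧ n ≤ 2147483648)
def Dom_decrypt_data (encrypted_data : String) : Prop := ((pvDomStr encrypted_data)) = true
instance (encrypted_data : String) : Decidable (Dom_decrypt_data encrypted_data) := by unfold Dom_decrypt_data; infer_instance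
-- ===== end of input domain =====

-- B replaces A's per-character ord-arithmetic loop with a prebuilt ROT13 translation table
-- applied by lookup in one pass (idiomatic str.maketrans/str.translate); return values agree on Dom.

-- ===== PORT A =====
-- one step of A's loop body: the character appended to `decrypted` for `char`
def pvStepA (c : Char) : Char :=
  if PySem.Chars.isalpha c then
    let offset : Int := if PySem.Chars.islower c then 97 else 65
    Char.ofNat (PySem.Int.mod ((c.toNat : Int) - offset + (-13)) 26 + offset).toNat
  else c

def decrypt_data (encrypted_data : String) : String :=
  if !(PySem.Str.startswith encrypted_data "ENCRYPTED:") then encrypted_data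
  else
    let data := (PySem.Str.slice encrypted_data (some 10) none).toList
    let decrypted := data.foldl (fun (acc : List Char) (c : Char) => acc ++ [pvStepA c]) []
    String.ofList decrypted

-- ===== PORT B =====
-- the translation table _ROT13 = str.maketrans(...), as an association list
def pvRot13Table : List (Char × Char) :=
  List.zip "abcdefghijklmnopqrstuvwxyzABCDEFGHIJKLMNOPQRSTUVWXYZ".toList
           "nopqrstuvwxyzabcdefghijklmNOPQRSTUVWXYZABCDEFGHIJKLM".toList

def decrypt_data_alt (encrypted_data : String) : String :=
  if !(PySem.Str.startswith encrypted_data "ENCRYPTED:") then encrypted_data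
  else
    String.ofList (((PySem.Str.slice encrypted_data (some 10) none).toList).map
      (fun c => (pvRot13Table.lookup c).getD c))

-- ===== PRECONDITION & SPEC =====
def Spec_decrypt_data (encrypted_data : String) (out : String) : Prop := out = decrypt_data_alt encrypted_data
instance (encrypted_data : String) (out : String) : Decidable (Spec_decrypt_data encrypted_data out) := by unfold Spec_decrypt_data; infer_instance

-- ===== CLAIM (what is proved, stated in full; the proofs are below) =====
def Claim_equal_decrypt_data : Prop := ∀ (encrypted_data : String), Dom_decrypt_data encrypted_data → Spec_decrypt_data encrypted_data (decrypt_data encrypted_data)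

-- ===== LEMMAS AND PROOFS =====

-- A's append-fold is a map
theorem pv_foldl_eq_map (l : List Char) (acc : List Char) :
    l.foldl (fun (acc : List Char) (c : Char) => acc ++ [pvStepA c]) acc = acc ++ l.map pvStepA := by
  induction l generalizing acc with
  | nil => simp
  | cons c t ih => simp [List.foldl, ih]

-- per-character agreement on every domain character, checked exhaustively over codes 0..126
theorem pv_step_eq (c : Char) (h : pvDomChar c = true) :
    pvStepA c = (pvRot13Table.lookup c).getD c := by
  have hle : c.toNat ≤ 126 := by
    simp only [pvDomChar, Bool.or_eq_true, Bool.and_eq_true, decide_eq_true_eq,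
      beq_iff_eq] at h
    omega
  have hall : (List.range 127).all
      (fun n => pvStepA (Char.ofNat n) == (pvRot13Table.lookup (Char.ofNat n)).getD (Char.ofNat n)) = true := by
    decide
  have hc := List.all_eq_true.mp hall c.toNat (List.mem_range.mpr (by omega))
  rw [Char.ofNat_toNat] at hc
  exact eq_of_beq hc

set_option maxHeartbeats 1000000 in
theorem decrypt_data_spec : Claim_equal_decrypt_data := by
  intro s hdom
  unfold Spec_decrypt_data decrypt_data decrypt_data_alt
  by_cases hpre : PySem.Str.startswith s "ENCRYPTED:" = true
  · have hpre' : PySem.Chars.startswith s.toList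
        ['E','N','C','R','Y','P','T','E','D',':'] = true := by simpa using hpre
    rw [if_neg (by simp [hpre']), if_neg (by simp [hpre'])]
    dsimp only
    rw [pv_foldl_eq_map, List.nil_append]
    congr 1
    apply List.map_congr_left
    intro c hc
    apply pv_step_eq
    have hc' : c ∈ s.toList := by
      apply PySem.List.mem_of_mem_slice (x := c) (xs := s.toList) (a? := some 10) (b? := none)
      simpa [PySem.Str.toList_slice] using hc
    exact List.all_eq_true.mp hdom c hc'
  · have hpre' : PySem.Chars.startswith s.toList
        ['E','N','C','R','Y','P','T','E','D',':'] = false := by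
      simpa using hpre
    rw [if_pos (by simp [hpre']), if_pos (by simp [hpre'])]
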